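-- pv_equiv track=rewrite | github.com/Jao42/aoc_solucoes | 2025/04/1.py | contar_adjacencias
-- ===== SOURCE A (Python) =====
-- def contar_adjacencias(matriz, l, col):
-- 	total = 0
-- 	for k in range(-1, 2):
-- 		for j in range(-1, 2):
-- 			if (l + k) < 0 or (col + j) < 0:
-- 				continue
-- 			try:
-- 				total += matriz[l + k][col + j]
-- 			except IndexError:
-- 				continue
-- 	return total
-- ===== SOURCE B (Python) =====
-- def contar_adjacencias(matriz, l, col):
--     total = 0
--     for row in matriz[max(0, l - 1):max(0, l + 2)]:
--         for v in row[max(0, col - 1):max(0, col + 2)]: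
--             total += v
--     return total
-- ===== Notes on version B (the rewrite author's own statement) =====
-- stated objective: simpler
-- what changed: Replaces the 9 individually guarded indexed accesses with try/except IndexError by iterating directly over the clamped sub-matrix extracted with two slices, letting slice clamping handle all boundaries.
import Mathlib
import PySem

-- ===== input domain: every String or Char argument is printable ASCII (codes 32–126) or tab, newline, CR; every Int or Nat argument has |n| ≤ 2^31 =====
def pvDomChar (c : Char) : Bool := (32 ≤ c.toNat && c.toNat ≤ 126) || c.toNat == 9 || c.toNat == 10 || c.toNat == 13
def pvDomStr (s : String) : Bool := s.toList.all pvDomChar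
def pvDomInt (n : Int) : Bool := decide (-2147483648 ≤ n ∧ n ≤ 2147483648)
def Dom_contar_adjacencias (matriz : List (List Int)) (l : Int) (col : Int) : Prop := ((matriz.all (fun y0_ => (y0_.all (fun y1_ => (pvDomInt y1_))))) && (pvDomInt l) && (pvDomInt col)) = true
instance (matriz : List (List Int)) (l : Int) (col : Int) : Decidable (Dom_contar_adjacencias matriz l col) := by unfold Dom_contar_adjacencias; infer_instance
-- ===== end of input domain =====

-- B replaces A's nine guarded indexed accesses with try/except by summing over the clamped
-- sub-matrix obtained with two slices (objective: simpler; same asymptotic cost).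

-- ===== PORT A =====
def contar_adjacencias (matriz : List (List Int)) (l : Int) (col : Int) : Int :=
  (PySem.List.pyRange (-1) 2 1).foldl (fun total k =>
    (PySem.List.pyRange (-1) 2 1).foldl (fun total j =>
      if l + k < 0 ∨ col + j < 0 then total
      else
        match PySem.List.pyGet? matriz (l + k) with   -- none = IndexError, caught: continue
        | none => total
        | some row =>
          match PySem.List.pyGet? row (col + j) with  -- none = IndexError, caught: continue
          | none => total
          | some v => total + v) total) 0

-- ===== PORT B =====
def contar_adjacencias_alt (matriz : List (List Int)) (l : Int) (col : Int) : Int :=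
  (PySem.List.slice matriz (some (max 0 (l - 1))) (some (max 0 (l + 2)))).foldl
    (fun total row =>
      (PySem.List.slice row (some (max 0 (col - 1))) (some (max 0 (col + 2)))).foldl
        (fun total v => total + v) total) 0

-- ===== PRECONDITION & SPEC =====
def Spec_contar_adjacencias (matriz : List (List Int)) (l : Int) (col : Int) (out : Int) : Prop := out = contar_adjacencias_alt matriz l col
instance (matriz : List (List Int)) (l : Int) (col : Int) (out : Int) : Decidable (Spec_contar_adjacencias matriz l col out) := by unfold Spec_contar_adjacencias; infer_instance

-- ===== CLAIM (what is proved, stated in full; the proofs are below) =====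
def Claim_equal_contar_adjacencias : Prop := ∀ (matriz : List (List Int)) (l : Int) (col : Int), Dom_contar_adjacencias matriz l col → Spec_contar_adjacencias matriz l col (contar_adjacencias matriz l col)

-- ===== LEMMAS AND PROOFS =====

-- value contributed by index j of a row (0 if j is negative or past the end)
def pvCellr (row : List Int) (j : Int) : Int :=
  if 0 ≤ j then ((row[j.toNat]?).getD 0) else 0

-- sum contributed by columns col-1, col, col+1 of a row
def pvRsum (row : List Int) (col : Int) : Int :=
  pvCellr row (col - 1) + pvCellr row col + pvCellr row (col + 1)

-- generic "clamped window" cell: f-value at index j of xs, 0 when out of range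
def pvWcell {α : Type} (xs : List α) (f : α → Int) (j : Int) : Int :=
  if 0 ≤ j then (((xs[j.toNat]?).map f).getD 0) else 0

lemma pvWtake3 {α : Type} (f : α → Int) (ys : List α) :
    ((ys.take 3).map f).sum
      = ((ys[0]?).map f).getD 0 + ((ys[1]?).map f).getD 0 + ((ys[2]?).map f).getD 0 := by
  rcases ys with _ | ⟨a, _ | ⟨b, _ | ⟨c, t⟩⟩⟩ <;> simp
  ring

lemma pvWtake2 {α : Type} (f : α → Int) (ys : List α) :
    ((ys.take 2).map f).sum = ((ys[0]?).map f).getD 0 + ((ys[1]?).map f).getD 0 := by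
  rcases ys with _ | ⟨a, _ | ⟨b, t⟩⟩ <;> simp

lemma pvWtake1 {α : Type} (f : α → Int) (ys : List α) :
    ((ys.take 1).map f).sum = ((ys[0]?).map f).getD 0 := by
  rcases ys with _ | ⟨a, t⟩ <;> simp

-- the clamped slice [max(0,c-1) : max(0,c+2)] sums exactly the window cells c-1, c, c+1
lemma pvWindowSum {α : Type} (f : α → Int) (xs : List α) (c t : Int) :
    (PySem.List.slice xs (some (max 0 (c - 1))) (some (max 0 (c + 2)))).foldl
        (fun a v => a + f v) t
      = t + (pvWcell xs f (c - 1) + pvWcell xs f c + pvWcell xs f (c + 1)) := by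
  rw [PySem.List.slice_toNat xs (le_max_left _ _) (le_max_left _ _),
      PySem.List.foldl_add]
  by_cases h2 : c ≤ -2
  · have ha : (max 0 (c - 1)).toNat = 0 := by omega
    have hb : (max 0 (c + 2)).toNat = 0 := by omega
    rw [ha, hb]
    simp only [Nat.sub_self, List.take_zero, List.map_nil, List.sum_nil, pvWcell]
    rw [if_neg (by omega), if_neg (by omega), if_neg (by omega)]
    ring
  · by_cases h1 : c = -1
    · subst h1
      have ha : (max 0 (-1 - 1 : Int)).toNat = 0 := by omega
      have hb : (max 0 (-1 + 2 : Int)).toNat = 1 := by omega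
      simp only [ha, hb, Nat.sub_zero, List.drop_zero, pvWtake1, pvWcell]
      rw [if_neg (by omega), if_neg (by omega), if_pos (by omega)]
      norm_num
    · by_cases h0 : c = 0
      · subst h0
        have ha : (max 0 (0 - 1 : Int)).toNat = 0 := by omega
        have hb : (max 0 (0 + 2 : Int)).toNat = 2 := by omega
        simp only [ha, hb, Nat.sub_zero, List.drop_zero, pvWtake2, pvWcell]
        rw [if_neg (by omega), if_pos (by omega), if_pos (by omega)]
        norm_num
      · have hc : 1 ≤ c := by omega
        have ha : (max 0 (c - 1)).toNat = (c - 1).toNat := by omega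
        have hn : (max 0 (c + 2)).toNat - (c - 1).toNat = 3 := by omega
        have h0 : c.toNat = (c - 1).toNat + 1 := by omega
        have hp : (c + 1).toNat = (c - 1).toNat + 2 := by omega
        rw [ha, hn]
        simp only [pvWtake3, List.getElem?_drop, pvWcell]
        rw [if_pos (by omega), if_pos (by omega), if_pos (by omega), h0, hp]
        simp

-- A's inner loop body adds exactly the window cell (0 on any of A's three skip paths)
lemma pvStepA (matriz : List (List Int)) (i j t : Int) :
    (if i < 0 ∨ j < 0 then t
     else
       match PySem.List.pyGet? matriz i with
       | none => t
       | some row =>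
         match PySem.List.pyGet? row j with
         | none => t
         | some v => t + v)
      = t + (if 0 ≤ i then pvCellr ((matriz[i.toNat]?).getD []) j else 0) := by
  by_cases hi : i < 0
  · simp [hi, if_neg (by omega : ¬ (0:Int) ≤ i)]
  · rw [if_pos (by omega : (0:Int) ≤ i)]
    by_cases hj : j < 0
    · simp [hj, pvCellr, if_neg (by omega : ¬ (0:Int) ≤ j)]
    · have hcond : ¬ (i < 0 ∨ j < 0) := by omega
      rw [if_neg hcond, PySem.List.pyGet?_of_nonneg matriz (by omega : (0:Int) ≤ i)]
      cases hrow : matriz[i.toNat]? with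
      | none => simp [pvCellr]
      | some row =>
        simp only [PySem.List.pyGet?_of_nonneg row (by omega : (0:Int) ≤ j),
          Option.getD_some, pvCellr, if_pos (by omega : (0:Int) ≤ j)]
        cases row[j.toNat]? <;> simp

-- A equals the sum of the nine window cells, grouped by row
lemma pvA_eq (matriz : List (List Int)) (l col : Int) :
    contar_adjacencias matriz l col
      = pvWcell matriz (fun row => pvRsum row col) (l - 1)
        + pvWcell matriz (fun row => pvRsum row col) l
        + pvWcell matriz (fun row => pvRsum row col) (l + 1) := by
  have hr : PySem.List.pyRange (-1) 2 1 = [-1, 0, 1] := by decide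
  simp only [contar_adjacencias, hr, List.foldl, pvStepA]
  have hcell : ∀ i : Int,
      (if 0 ≤ i then pvCellr ((matriz[i.toNat]?).getD []) (col + -1) else 0)
        + (if 0 ≤ i then pvCellr ((matriz[i.toNat]?).getD []) (col + 0) else 0)
        + (if 0 ≤ i then pvCellr ((matriz[i.toNat]?).getD []) (col + 1) else 0)
      = pvWcell matriz (fun row => pvRsum row col) i := by
    intro i
    simp only [pvWcell]
    split_ifs with h
    · cases hrow : matriz[i.toNat]? with
      | none => simp [pvCellr]
      | some row =>
          simp only [Option.getD_some, Option.map_some]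
          have e1 : col + -1 = col - 1 := by ring
          have e2 : col + 0 = col := by ring
          rw [e1, e2]
          simp [pvRsum]
    · simp
  have e1 : l + -1 = l - 1 := by ring
  have e2 : l + 0 = l := by ring
  rw [e1, e2]
  linear_combination hcell (l - 1) + hcell l + hcell (l + 1)

-- B equals the same sum of window cells
lemma pvB_eq (matriz : List (List Int)) (l col : Int) :
    contar_adjacencias_alt matriz l col
      = pvWcell matriz (fun row => pvRsum row col) (l - 1)
        + pvWcell matriz (fun row => pvRsum row col) l
        + pvWcell matriz (fun row => pvRsum row col) (l + 1) := by
  unfold contar_adjacencias_alt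
  have hstep : (fun (total : Int) (row : List Int) =>
      (PySem.List.slice row (some (max 0 (col - 1))) (some (max 0 (col + 2)))).foldl
        (fun total v => total + v) total)
      = fun total row => total + pvRsum row col := by
    funext t row
    have := pvWindowSum (fun v : Int => v) row col t
    simpa [pvRsum, pvCellr, pvWcell] using this
  rw [hstep, pvWindowSum (fun row => pvRsum row col) matriz l 0]
  ring

-- ===== VERDICT (by name: the statement is the Claim_ definition above) =====
theorem contar_adjacencias_spec : Claim_equal_contar_adjacencias := by
  intro matriz l col _
  unfold Spec_contar_adjacencias
  rw [pvA_eq, pvB_eq]
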